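-- pv_equiv track=rewrite | github.com/wantanwonderland/MHC-ACS | MHC-ACS/app/utils/FRS.py | get_sbp_group
-- ===== SOURCE A (Python) =====
-- systolic_bp_map = {
--         # 0 for not treated, 1 for treated
--         "men": {
--             "<120": {0: -2, 1: 0},
--             "120-129": {0: 0, 1: 2},
--             "130-139": {0: 1, 1: 3},
--             "140-159": {0: 2, 1: 4},
--             ">160": {0: 3, 1: 5}
--         },
--         "women": {
--             "<120": {0: -3, 1: -1},
--             "120-129": {0: 0, 1: 2},
--             "130-139": {0: 1, 1: 3},
--             "140-149": {0: 2, 1: 5},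
--             "150-159": {0: 4, 1: 6},
--             ">160": {0: 5, 1: 7}
--         }
-- }
--
-- def get_sbp_group(sex, sbp):
--     if sex not in systolic_bp_map:
--         return None
--
--     for sbp_range in systolic_bp_map[sex]:
--         if '-' in sbp_range:
--             min_sbp, max_sbp = map(float, sbp_range.split('-'))
--             if min_sbp <= sbp <= max_sbp:
--                 return sbp_range
--         elif sbp_range.startswith('>') and sbp > float(sbp_range[1:]):
--             return sbp_range
--         elif sbp_range.startswith('<') and sbp < float(sbp_range[1:]):
--             return sbp_range
--     return None
-- ===== SOURCE B (Python) =====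
-- def get_sbp_group(sex, sbp):
--     if sex == "men":
--         if sbp < 120:
--             return "<120"
--         elif sbp <= 129:
--             return "120-129"
--         elif sbp <= 139:
--             return "130-139"
--         elif sbp <= 159:
--             return "140-159"
--         else:
--             return ">160"
--     elif sex == "women":
--         if sbp < 120:
--             return "<120"
--         elif sbp <= 129:
--             return "120-129"
--         elif sbp <= 139:
--             return "130-139"
--         elif sbp <= 149:
--             return "140-149"
--         elif sbp <= 159:
--             return "150-159"
--         else:
--             return ">160"
--     else:
--         return None
-- ===== Notes on version B (the rewrite author's own statement) =====
-- stated objective: simpler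
-- what changed: Replaced the table-driven scan over dict keys with string parsing ('-' split, float() of key fragments) by a direct per-sex if/elif chain on explicit numeric thresholds.
-- intended difference: For sex 'men' or 'women' with sbp exactly 160, A returns None (its '…-159' bands stop at 159 and its '>160' test is strict, leaving a one-point gap), while B returns '>160', the intended band for that reading. — e.g. on get_sbp_group("men", 160): A returns none, B returns some ">160"
import Mathlib
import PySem

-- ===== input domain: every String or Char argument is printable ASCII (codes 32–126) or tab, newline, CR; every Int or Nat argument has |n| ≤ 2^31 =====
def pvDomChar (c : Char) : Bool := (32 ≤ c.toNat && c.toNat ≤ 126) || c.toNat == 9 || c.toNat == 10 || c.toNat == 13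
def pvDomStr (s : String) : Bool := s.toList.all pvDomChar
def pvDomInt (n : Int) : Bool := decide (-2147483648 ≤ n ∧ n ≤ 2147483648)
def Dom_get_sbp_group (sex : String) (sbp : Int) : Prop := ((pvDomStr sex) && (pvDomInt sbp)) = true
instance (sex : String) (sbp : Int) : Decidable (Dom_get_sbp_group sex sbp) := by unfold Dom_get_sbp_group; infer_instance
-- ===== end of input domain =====

-- B replaces A's table scan with a direct per-sex if/elif chain (simpler), and intentionally
-- returns ">160" at sbp = 160 where A's strict '>' leaves a one-point gap (see D_ below).

-- ===== PORT A =====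
-- the module-level dict; inner int→int score maps kept as association lists (only the keys are used by the loop)
def systolic_bp_map : PySem.Dict String (PySem.Dict String (PySem.Dict Int Int)) :=
  PySem.Dict.ofList [ ("men",
      PySem.Dict.ofList [ ("<120",    PySem.Dict.ofList [(0, -2), (1, 0)]),
        ("120-129", PySem.Dict.ofList [(0, 0),  (1, 2)]),
        ("130-139", PySem.Dict.ofList [(0, 1),  (1, 3)]),
        ("140-159", PySem.Dict.ofList [(0, 2),  (1, 4)]),
        (">160",    PySem.Dict.ofList [(0, 3),  (1, 5)]) ]),
    ("women",
      PySem.Dict.ofList [ ("<120",    PySem.Dict.ofList [(0, -3), (1, -1)]),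
        ("120-129", PySem.Dict.ofList [(0, 0),  (1, 2)]),
        ("130-139", PySem.Dict.ofList [(0, 1),  (1, 3)]),
        ("140-149", PySem.Dict.ofList [(0, 2),  (1, 5)]),
        ("150-159", PySem.Dict.ofList [(0, 4),  (1, 6)]),
        (">160",    PySem.Dict.ofList [(0, 5),  (1, 7)]) ] ) ]

-- float(...) in A is applied only to the integer-valued literal key fragments ("120", "160", …),
-- where it is exact; ported as int parsing (ofStr?, with getD 0 never reached on these literals).
def pvFloat (s : String) : Int := (PySem.Int.ofStr? s).getD 0

-- the 'for sbp_range in systolic_bp_map[sex]' loop, branch for branch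
def pvLoopA (sbp : Int) : List String → Option String
  | [] => none
  | r :: rest =>
    if PySem.Str.isIn "-" r then
      let parts := (PySem.Str.split? r "-").getD []
      let min_sbp := pvFloat (parts.getD 0 "")
      let max_sbp := pvFloat (parts.getD 1 "")
      if min_sbp ≤ sbp ∧ sbp ≤ max_sbp then some r else pvLoopA sbp rest
    else if PySem.Str.startswith r ">" ∧ pvFloat (PySem.Str.slice r (some 1) none) < sbp then
      some r
    else if PySem.Str.startswith r "<" ∧ sbp < pvFloat (PySem.Str.slice r (some 1) none) then
      some r
    else pvLoopA sbp rest

def get_sbp_group (sex : String) (sbp : Int) : Option String :=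
  if (PySem.Dict.get? systolic_bp_map sex).isNone then none
  else pvLoopA sbp (PySem.Dict.keys ((PySem.Dict.get? systolic_bp_map sex).getD PySem.Dict.empty))

-- ===== PORT B =====
def get_sbp_group_alt (sex : String) (sbp : Int) : Option String :=
  if sex = "men" then
    if sbp < 120 then some "<120"
    else if sbp ≤ 129 then some "120-129"
    else if sbp ≤ 139 then some "130-139"
    else if sbp ≤ 159 then some "140-159"
    else some ">160"
  else if sex = "women" then
    if sbp < 120 then some "<120"
    else if sbp ≤ 129 then some "120-129"
    else if sbp ≤ 139 then some "130-139"
    else if sbp ≤ 149 then some "140-149"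
    else if sbp ≤ 159 then some "150-159"
    else some ">160"
  else none

-- ===== PRECONDITION & SPEC =====
-- For sex "men"/"women" and sbp exactly 160, A returns None (its "…-159" bands stop at 159 and
-- its '>' test is strict, leaving a one-point gap), while B returns ">160", the intended band.
def D_get_sbp_group (sex : String) (sbp : Int) : Prop :=
  (sex = "men" ∨ sex = "women") ∧ sbp = 160
instance (sex : String) (sbp : Int) : Decidable (D_get_sbp_group sex sbp) := by
  unfold D_get_sbp_group; infer_instance

def Spec_get_sbp_group (sex : String) (sbp : Int) (out : Option String) : Prop :=
  ¬ D_get_sbp_group sex sbp → out = get_sbp_group_alt sex sbp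
instance (sex : String) (sbp : Int) (out : Option String) : Decidable (Spec_get_sbp_group sex sbp out) := by
  unfold Spec_get_sbp_group; infer_instance

def pvDiffWitness_get_sbp_group : String × Int := ("men", 160)
def pvDiffWitnessOut_get_sbp_group : (Option String) × (Option String) := (none, some ">160")

-- ===== CLAIM (what is proved, stated in full; the proofs are below) =====
def Claim_unchanged_get_sbp_group : Prop := ∀ (sex : String) (sbp : Int), Dom_get_sbp_group sex sbp → Spec_get_sbp_group sex sbp (get_sbp_group sex sbp)
def Claim_changed_get_sbp_group : Prop := Dom_get_sbp_group (pvDiffWitness_get_sbp_group.1) (pvDiffWitness_get_sbp_group.2) ∧ D_get_sbp_group (pvDiffWitness_get_sbp_group.1) (pvDiffWitness_get_sbp_group.2) ∧ get_sbp_group (pvDiffWitness_get_sbp_group.1) (pvDiffWitness_get_sbp_group.2) = pvDiffWitnessOut_get_sbp_group.1 ∧ get_sbp_group_alt (pvDiffWitness_get_sbp_group.1) (pvDiffWitness_get_sbp_group.2) = pvDiffWitnessOut_get_sbp_group.2 ∧ pvDiffWitnessOut_get_sbp_group.1 ≠ pvDiffWitnessOut_get_sbp_group.2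
def Claim_exact_get_sbp_group : Prop := ∀ (sex : String) (sbp : Int), Dom_get_sbp_group sex sbp → D_get_sbp_group sex sbp → get_sbp_group sex sbp ≠ get_sbp_group_alt sex sbp

-- ===== LEMMAS AND PROOFS =====
-- one unfolding step of A's loop, per branch kind (side conditions discharged by decide on the literal key)
lemma step_hyphen (sbp : Int) (r : String) (rest : List String) (mn mx : Int)
    (hin : PySem.Str.isIn "-" r = true)
    (hmn : pvFloat (((PySem.Str.split? r "-").getD []).getD 0 "") = mn)
    (hmx : pvFloat (((PySem.Str.split? r "-").getD []).getD 1 "") = mx) :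
    pvLoopA sbp (r :: rest) = if mn ≤ sbp ∧ sbp ≤ mx then some r else pvLoopA sbp rest := by
  simp only [pvLoopA, hin, hmn, hmx]
  simp

lemma step_gt (sbp : Int) (r : String) (rest : List String) (t : Int)
    (hin : PySem.Str.isIn "-" r = false)
    (hsw : PySem.Str.startswith r ">" = true)
    (hlt : PySem.Str.startswith r "<" = false)
    (ht : pvFloat (PySem.Str.slice r (some 1) none) = t) :
    pvLoopA sbp (r :: rest) = if t < sbp then some r else pvLoopA sbp rest := by
  simp only [pvLoopA, hin, hsw, hlt, ht]
  simp

lemma step_lt (sbp : Int) (r : String) (rest : List String) (t : Int)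
    (hin : PySem.Str.isIn "-" r = false)
    (hgt : PySem.Str.startswith r ">" = false)
    (hsw : PySem.Str.startswith r "<" = true)
    (ht : pvFloat (PySem.Str.slice r (some 1) none) = t) :
    pvLoopA sbp (r :: rest) = if sbp < t then some r else pvLoopA sbp rest := by
  simp only [pvLoopA, hin, hgt, hsw, ht]
  simp

lemma men_lookup (sbp : Int) :
    get_sbp_group "men" sbp = pvLoopA sbp ["<120", "120-129", "130-139", "140-159", ">160"] := by
  have hnone : (PySem.Dict.get? systolic_bp_map "men").isNone = false := by decide
  have hks : PySem.Dict.keys ((PySem.Dict.get? systolic_bp_map "men").getD PySem.Dict.empty) =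
      ["<120", "120-129", "130-139", "140-159", ">160"] := by decide
  simp [get_sbp_group, hnone, hks]

lemma women_lookup (sbp : Int) :
    get_sbp_group "women" sbp = pvLoopA sbp ["<120", "120-129", "130-139", "140-149", "150-159", ">160"] := by
  have hnone : (PySem.Dict.get? systolic_bp_map "women").isNone = false := by decide
  have hks : PySem.Dict.keys ((PySem.Dict.get? systolic_bp_map "women").getD PySem.Dict.empty) =
      ["<120", "120-129", "130-139", "140-149", "150-159", ">160"] := by decide
  simp [get_sbp_group, hnone, hks]

lemma men_eq (sbp : Int) (h : sbp ≠ 160) :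
    get_sbp_group "men" sbp = get_sbp_group_alt "men" sbp := by
  rw [men_lookup,
    step_lt sbp "<120" _ 120 (by decide) (by decide) (by decide) (by decide),
    step_hyphen sbp "120-129" _ 120 129 (by decide) (by decide) (by decide),
    step_hyphen sbp "130-139" _ 130 139 (by decide) (by decide) (by decide),
    step_hyphen sbp "140-159" _ 140 159 (by decide) (by decide) (by decide),
    step_gt sbp ">160" _ 160 (by decide) (by decide) (by decide) (by decide)]
  simp only [get_sbp_group_alt, pvLoopA]
  split_ifs <;> first | rfl | omega

lemma women_eq (sbp : Int) (h : sbp ≠ 160) :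
    get_sbp_group "women" sbp = get_sbp_group_alt "women" sbp := by
  rw [women_lookup,
    step_lt sbp "<120" _ 120 (by decide) (by decide) (by decide) (by decide),
    step_hyphen sbp "120-129" _ 120 129 (by decide) (by decide) (by decide),
    step_hyphen sbp "130-139" _ 130 139 (by decide) (by decide) (by decide),
    step_hyphen sbp "140-149" _ 140 149 (by decide) (by decide) (by decide),
    step_hyphen sbp "150-159" _ 150 159 (by decide) (by decide) (by decide),
    step_gt sbp ">160" _ 160 (by decide) (by decide) (by decide) (by decide)]
  simp only [get_sbp_group_alt, pvLoopA]
  split_ifs <;> first | rfl | omega | (exact absurd ‹_› (by decide)) | trivial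

lemma other_eq (sex : String) (hm : sex ≠ "men") (hw : sex ≠ "women") (sbp : Int) :
    get_sbp_group sex sbp = get_sbp_group_alt sex sbp := by
  have hk : PySem.Dict.keys systolic_bp_map = ["men", "women"] := by decide
  have hnone : PySem.Dict.get? systolic_bp_map sex = none := by
    rw [PySem.Dict.get?_eq_none_iff_not_mem_keys, hk]
    simp [hm, hw]
  simp [get_sbp_group, get_sbp_group_alt, hnone, hm, hw]

-- ===== VERDICT (by name: the statement is the Claim_ definition above) =====
theorem get_sbp_group_spec : Claim_unchanged_get_sbp_group := by
  intro sex sbp _ hD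
  by_cases hm : sex = "men"
  · subst hm; exact men_eq sbp (by intro h; exact hD ⟨Or.inl rfl, h⟩)
  · by_cases hw : sex = "women"
    · subst hw; exact women_eq sbp (by intro h; exact hD ⟨Or.inr rfl, h⟩)
    · exact other_eq sex hm hw sbp

theorem get_sbp_group_changed : Claim_changed_get_sbp_group := by
  unfold Claim_changed_get_sbp_group; decide

theorem get_sbp_group_tight : Claim_exact_get_sbp_group := by
  intro sex sbp _ hD
  obtain ⟨hsex, hsbp⟩ := hD
  subst hsbp
  rcases hsex with h | h <;> subst h <;> decide
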